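-- pv_equiv track=rewrite | github.com/AP-MI-2021/lab-3-andreeabejinariu0 | main.py | get_longest_product_is_odd
-- ===== SOURCE A (Python) =====
-- import math
--
-- def is_odd(n):
--     '''
--     verifica daca numarul este impar
--     :param n: numarul pentru care verificam paritatea
--     :return: rezultatul verificarii
--     '''
--     if n % 2 == 1:
--         return True
--     else:
--         return False
--
-- def product_list_is_odd(lista):
--     '''
--     Verifica daca produsul elementelor este impar
--     :param lista: lista ce contine elementele de inmultit
--     :return: rezultatul verificarii
--     '''
--     p = math.prod(lista)
--     return is_odd(p)
--
-- def get_longest_product_is_odd(lista):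
--     '''
--     Gaseste si returneaza cea mai lunga secventaa listei pt care produsul elementelor este un nr impar
--     :param lista: lista in care va cauta subsecventa cu proprietatea ceruta
--     :return: secventa maxima care implineste proprietatea ceruta
--     '''
--     secventa_maxima = []
--     for start in range(0,len(lista)):
--         for end in range(start + 1, len(lista) + 1):
--             if product_list_is_odd(lista[start:end]):
--                 secventa_maxima.append(lista[start:end])
--     secventa_maxima_finala = []
--     for lista_elemente in secventa_maxima:
--         if len(lista_elemente) > len(secventa_maxima_finala):
--             secventa_maxima_finala = lista_elemente
--     return secventa_maxima_finala
-- ===== SOURCE B (Python) =====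
-- def get_longest_product_is_odd(lista):
--     '''
--     Single right-to-left pass: maintain the current run of consecutive odd
--     elements of the suffix seen so far, and keep the longest run (ties go to
--     the leftmost, as encountered last in the right-to-left scan).
--     '''
--     best = []
--     run = []
--     for x in reversed(lista):
--         if x % 2 == 1:
--             run = [x] + run
--             if len(run) >= len(best):
--                 best = run
--         else:
--             run = []
--     return best
-- ===== Notes on version B (the rewrite author's own statement) =====
-- stated objective: faster
-- what changed: A collects every contiguous slice with odd product (computing each slice's product) and then scans for the first longest; B makes a single right-to-left pass that maintains the current run of consecutive odd elements and keeps the longest run, leftmost on ties.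
import Mathlib
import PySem

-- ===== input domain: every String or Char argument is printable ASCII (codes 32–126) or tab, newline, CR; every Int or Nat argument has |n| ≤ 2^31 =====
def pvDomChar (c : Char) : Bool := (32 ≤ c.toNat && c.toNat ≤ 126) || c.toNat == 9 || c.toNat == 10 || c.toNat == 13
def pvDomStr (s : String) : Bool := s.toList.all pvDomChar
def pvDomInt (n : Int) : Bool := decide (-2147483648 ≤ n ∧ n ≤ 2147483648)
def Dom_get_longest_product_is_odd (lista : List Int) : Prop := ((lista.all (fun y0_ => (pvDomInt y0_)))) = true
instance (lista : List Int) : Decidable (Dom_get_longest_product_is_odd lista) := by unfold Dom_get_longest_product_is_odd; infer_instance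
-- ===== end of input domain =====

-- B replaces A's enumeration of all slices (testing each product) by one
-- right-to-left pass keeping the current and the longest run of consecutive
-- odd elements (objective: faster).

-- ===== PORT A =====
def is_odd (n : Int) : Bool := if PySem.Int.mod n 2 == 1 then true else false

def product_list_is_odd (lista : List Int) : Bool := is_odd (lista.foldl (fun a b => a * b) 1)

def get_longest_product_is_odd (lista : List Int) : List Int :=
  let secventa_maxima : List (List Int) :=
    (PySem.List.pyRange 0 lista.length 1).foldl (fun acc start =>
      (PySem.List.pyRange (start + 1) ((lista.length : Int) + 1) 1).foldl (fun acc2 e =>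
        if product_list_is_odd (PySem.List.slice lista (some start) (some e))
        then acc2 ++ [PySem.List.slice lista (some start) (some e)]
        else acc2) acc) []
  secventa_maxima.foldl (fun fin c => if c.length > fin.length then c else fin) []

-- ===== PORT B =====
def get_longest_product_is_odd_alt (lista : List Int) : List Int :=
  (lista.reverse.foldl (fun (st : List Int × List Int) x =>
      if PySem.Int.mod x 2 == 1 then
        let run := [x] ++ st.2
        if run.length ≥ st.1.length then (run, run) else (st.1, run)
      else (st.1, [])) ([], [])).1

-- ===== PRECONDITION & SPEC =====
def Spec_get_longest_product_is_odd (lista : List Int) (out : List Int) : Prop := out = get_longest_product_is_odd_alt lista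
instance (lista : List Int) (out : List Int) : Decidable (Spec_get_longest_product_is_odd lista out) := by unfold Spec_get_longest_product_is_odd; infer_instance

-- ===== CLAIM (what is proved, stated in full; the proofs are below) =====
def Claim_equal_get_longest_product_is_odd : Prop := ∀ (lista : List Int), Dom_get_longest_product_is_odd lista → Spec_get_longest_product_is_odd lista (get_longest_product_is_odd lista)

-- ===== LEMMAS AND PROOFS =====

-- proof-side vocabulary: pvOdd = the parity test, pvPick = A's final selection
-- step, pvRun = leading run of odd elements, pvT l s k = the slice l[s:s+k+1],
-- pvCands = the all-odd slices A collects, pvFL = "first longest candidate"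
def pvOdd (x : Int) : Bool := PySem.Int.mod x 2 == 1
def pvPick (b c : List Int) : List Int := if c.length > b.length then c else b
def pvRun (l : List Int) : List Int := l.takeWhile pvOdd
def pvT (l : List Int) (s k : Nat) : List Int := (l.drop s).take (k + 1)
def pvCands (l : List Int) : List (List Int) :=
  (List.range l.length).flatMap (fun s => (List.range (pvRun (l.drop s)).length).map (pvT l s))
def pvFL (l : List Int) : List Int := (pvCands l).foldl pvPick []
def pvStep (st : List Int × List Int) (x : Int) : List Int × List Int :=
  if PySem.Int.mod x 2 == 1 then
    let run := [x] ++ st.2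
    if run.length ≥ st.1.length then (run, run) else (st.1, run)
  else (st.1, [])

theorem pvOdd_emod (a : Int) : pvOdd a = (a % 2 == 1) := by
  rw [pvOdd, PySem.Int.mod_eq_emod_of_pos (by norm_num)]

theorem pvOdd_mul (a b : Int) : pvOdd (a * b) = (pvOdd a && pvOdd b) := by
  simp only [pvOdd_emod]
  rcases Int.emod_two_eq a with h1 | h1 <;> rcases Int.emod_two_eq b with h2 | h2 <;>
    simp [Int.mul_emod, h1, h2]

theorem podd_aux (t : List Int) : ∀ a : Int, pvOdd (t.foldl (fun a b => a * b) a) = (pvOdd a && t.all pvOdd) := by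
  induction t with
  | nil => intro a; simp
  | cons x xs ih => intro a; simp [List.foldl_cons, ih, pvOdd_mul, Bool.and_assoc]

-- a slice has odd product iff all its elements are odd
theorem podd_all (t : List Int) : product_list_is_odd t = t.all pvOdd := by
  have h1 : pvOdd (1 : Int) = true := by decide
  have h2 : ∀ n : Int, is_odd n = pvOdd n := by
    intro n
    rw [is_odd, pvOdd]
    cases h : (PySem.Int.mod n 2 == 1) <;> simp
  rw [product_list_is_odd, h2, podd_aux, h1, Bool.true_and]

theorem pv_all_take (u : List Int) (m : Nat) (h : m ≤ u.length) :
    (u.take m).all pvOdd = decide (m ≤ (pvRun u).length) := by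
  induction u generalizing m with
  | nil => simp at h; simp [h, pvRun]
  | cons x xs ih =>
    cases m with
    | zero => simp
    | succ m =>
      by_cases hx : pvOdd x
      · simp [pvRun, hx] at *
        rw [ih m (by omega)]
        simp
      · simp [pvRun, hx]

theorem pv_filter_range (m r : Nat) (h : r ≤ m) :
    (List.range m).filter (fun k => decide (k + 1 ≤ r)) = List.range r := by
  induction m with
  | zero => interval_cases r; simp
  | succ m ih =>
    rcases Nat.lt_or_ge r (m+1) with h' | h'
    · rw [List.range_succ, List.filter_append, ih (by omega)]
      simp; omega
    · have hr : r = m + 1 := by omega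
      subst hr
      rw [List.range_succ, List.filter_append]
      have : (List.range m).filter (fun k => decide (k + 1 ≤ m + 1)) = List.range m := by
        apply List.filter_eq_self.mpr
        intro a ha; simp [List.mem_range] at ha ⊢; omega
      rw [this]; simp

-- A's final loop keeps the first strictly-longest element: general fold facts
theorem pickfold (cs : List (List Int)) (p : List Int) :
    cs.foldl pvPick p = if (cs.foldl pvPick []).length > p.length then cs.foldl pvPick [] else p := by
  induction cs generalizing p with
  | nil => simp
  | cons c cs ih =>
    simp only [List.foldl_cons]
    rw [ih (pvPick p c), ih (pvPick [] c)]
    unfold pvPick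
    split_ifs <;> first | rfl | omega | simp_all

theorem block_fold (u : List Int) (m : Nat) (h : m ≤ u.length) :
    ((List.range m).map (fun k => u.take (k + 1))).foldl pvPick [] = u.take m := by
  induction m with
  | zero => simp
  | succ m ih =>
    rw [List.range_succ, List.map_append, List.foldl_append, ih (by omega)]
    simp only [List.map_cons, List.map_nil, List.foldl_cons, List.foldl_nil]
    unfold pvPick
    have h1 : (u.take (m+1)).length = m + 1 := by simp; omega
    have h2 : (u.take m).length = m := by simp; omega
    rw [h1, h2]
    simp

-- A's collected candidate list, normalised to pvCands
theorem A_eq (l : List Int) : get_longest_product_is_odd l = pvFL l := by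
  rw [get_longest_product_is_odd]
  have hinner : ∀ (acc : List (List Int)) (start : Int),
      (PySem.List.pyRange (start + 1) ((l.length : Int) + 1) 1).foldl (fun acc2 e =>
        if product_list_is_odd (PySem.List.slice l (some start) (some e))
        then acc2 ++ [PySem.List.slice l (some start) (some e)]
        else acc2) acc
      = acc ++ ((PySem.List.pyRange (start + 1) ((l.length : Int) + 1) 1).filter
          (fun e => product_list_is_odd (PySem.List.slice l (some start) (some e)))).map
          (fun e => PySem.List.slice l (some start) (some e)) := by
    intro acc start
    exact PySem.List.foldl_append_if _ _ _ _
  simp only [hinner]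
  rw [PySem.List.foldl_append_eq_flatMap]
  rw [List.nil_append]
  show (List.foldl pvPick []) _ = pvFL l
  rw [pvFL]
  congr 1
  rw [PySem.List.pyRange_zero_nat, List.flatMap_map, pvCands]
  apply List.flatMap_congr
  intro s hs
  rw [List.mem_range] at hs
  rw [PySem.List.pyRange_one]
  have h1 : ((l.length : Int) + 1 - (↑s + 1)).toNat = l.length - s := by omega
  rw [h1, List.filter_map, List.map_map]
  have hfun : ∀ k : Nat, PySem.List.slice l (some ↑s) (some (↑s + 1 + ↑k)) = pvT l s k := by
    intro k
    have h2 : ((s : Int) + 1 + ↑k) = (↑s + ((k + 1 : Nat) : Int)) := by push_cast; ring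
    rw [h2, PySem.List.slice_natCast_add]
    rfl
  have hmap : ∀ k ∈ List.range (l.length - s),
      ((fun e => PySem.List.slice l (some ↑s) (some e)) ∘ fun k => ↑s + 1 + ↑k) k = pvT l s k := by
    intro k _; exact hfun k
  have hlen : (l.drop s).length = l.length - s := by simp
  have hfilt : ∀ k ∈ List.range (l.length - s),
      ((fun e => product_list_is_odd (PySem.List.slice l (some ↑s) (some e))) ∘ fun k => ↑s + 1 + ↑k) k
        = decide (k + 1 ≤ (pvRun (l.drop s)).length) := by
    intro k hk
    rw [List.mem_range] at hk
    show product_list_is_odd (PySem.List.slice l (some ↑s) (some (↑s + 1 + ↑k))) = _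
    rw [hfun k, podd_all, pvT, pv_all_take (l.drop s) (k + 1) (by omega)]
  rw [List.filter_congr hfilt]
  rw [pv_filter_range (l.length - s) (pvRun (l.drop s)).length
      (by rw [← hlen]; exact (List.takeWhile_prefix _).length_le)]
  apply List.map_congr_left
  intro k hk
  have : k ∈ List.range (l.length - s) := by
    rw [List.mem_range] at *
    have h3 := (List.takeWhile_prefix (l := l.drop s) pvOdd).length_le
    rw [List.length_drop] at h3
    simp only [pvRun] at hk
    omega
  exact hmap k this

theorem pvCands_cons (x : Int) (xs : List Int) :
    pvCands (x :: xs) =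
      (List.range (pvRun (x :: xs)).length).map (pvT (x :: xs) 0) ++ pvCands xs := by
  unfold pvCands
  rw [List.length_cons, List.range_succ_eq_map, List.flatMap_cons, List.flatMap_map]
  congr 1

-- the shared cons recurrence of both programs
theorem FL_cons (x : Int) (xs : List Int) :
    pvFL (x :: xs) = if pvOdd x then pvPick (x :: pvRun xs) (pvFL xs) else pvFL xs := by
  rw [pvFL, pvCands_cons, List.foldl_append]
  have hb : ((List.range (pvRun (x :: xs)).length).map (pvT (x :: xs) 0)).foldl pvPick []
      = (x :: xs).take (pvRun (x :: xs)).length := by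
    have := block_fold (x :: xs) (pvRun (x :: xs)).length ((List.takeWhile_prefix _).length_le)
    simpa [pvT] using this
  rw [hb]
  have htw : (x :: xs).take (pvRun (x :: xs)).length = pvRun (x :: xs) := by
    exact (List.prefix_iff_eq_take.mp (List.takeWhile_prefix _)).symm
  rw [htw]
  by_cases hx : pvOdd x
  · have : pvRun (x :: xs) = x :: pvRun xs := by simp [pvRun, hx]
    rw [this, pickfold]
    simp only [hx, if_true]
    rfl
  · have : pvRun (x :: xs) = [] := by simp [pvRun, hx]
    rw [this]
    simp [hx, pvFL]

theorem B_pair (l : List Int) :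
    l.foldr (fun x st => pvStep st x) ([], []) = (pvFL l, pvRun l) := by
  induction l with
  | nil => simp [pvFL, pvCands, pvRun]
  | cons x xs ih =>
    rw [List.foldr_cons, ih, FL_cons]
    unfold pvStep
    by_cases hx : pvOdd x
    · have hx' : (PySem.Int.mod x 2 == 1) = true := hx
      simp only [hx', if_true]
      have hrun : pvRun (x :: xs) = x :: pvRun xs := by simp [pvRun, hx]
      rw [hrun]
      simp only [hx, if_true]
      unfold pvPick
      by_cases hge : ([x] ++ pvRun xs).length ≥ (pvFL xs).length
      · have hn : ¬ ((pvFL xs).length > (x :: pvRun xs).length) := by simp at hge ⊢; omega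
        rw [if_pos hge, if_neg hn]
        simp
      · have hp : (pvFL xs).length > (x :: pvRun xs).length := by simp at hge ⊢; omega
        rw [if_neg hge, if_pos hp]
        simp
    · have hx' : (PySem.Int.mod x 2 == 1) = false := by simpa [pvOdd] using hx
      simp only [hx', Bool.false_eq_true, if_false]
      have hrun : pvRun (x :: xs) = [] := by simp [pvRun, hx]
      rw [hrun]
      simp [hx]

theorem B_eq (l : List Int) : get_longest_product_is_odd_alt l = pvFL l := by
  rw [get_longest_product_is_odd_alt, List.foldl_reverse]
  have : (fun (x : Int) (st : List Int × List Int) => pvStep st x) = (fun x st =>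
      if PySem.Int.mod x 2 == 1 then
        let run := [x] ++ st.2
        if run.length ≥ st.1.length then (run, run) else (st.1, run)
      else (st.1, [])) := by
    funext x st; rfl
  rw [← this, B_pair]

-- ===== VERDICT (by name: the statement is the Claim_ definition above) =====
theorem get_longest_product_is_odd_spec : Claim_equal_get_longest_product_is_odd := by
  intro l _
  show _ = _
  rw [A_eq, B_eq]
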